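-- pv_equiv track=rewrite | github.com/miliar/Code_Jam_Webscraper | solutions_python/Problem_203/729.py | cakeSplit
-- ===== SOURCE A (Python) =====
-- def cakeSplit(grid, row, col):
--     emptyRows = 0
--     filled = False
--     for r in range(row):
--         empty = 0
--         seen = '?'
--         for c in range(col):
--             if grid[r][c] == '?' and seen == '?':
--                 empty += 1
--             elif grid[r][c] != '?' and empty > 0:
--                 seen = grid[r][c]
--                 for i in range(empty):
--                     grid[r][i] = seen
--                 empty = 0
--             elif grid[r][c] != '?' and empty == 0:
--                 seen = grid[r][c]
--             elif grid[r][c] == '?' and seen != '?':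
--                 grid[r][c] = seen
--         if seen == '?' and filled == False:
--             emptyRows += 1
--         elif seen == '?' and filled == True:
--             grid[r] = grid[r - 1]
--
--         elif seen != '?' and filled == False:
--             for i in range(emptyRows):
--                 grid[i] = grid[r]
--             filled = True
--     return grid
-- ===== SOURCE B (Python) =====
-- # Two-phase functional rewrite: per-row horizontal fill returning None for all-'?' rows,
-- # then a single vertical sweep carrying the nearest filled row. Return-value equivalent to A
-- # (A mutates rows in place / aliases row objects; B assigns fresh row lists).
-- def cakeSplit(grid, row, col):
--     R, C = max(row, 0), max(col, 0)
--
--     def hfill(cells):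
--         first = next((c for c in range(C) if cells[c] != '?'), None)
--         if first is None:
--             return None
--         out = list(cells)
--         last = cells[first]
--         for c in range(C):
--             if cells[c] != '?':
--                 last = cells[c]
--             out[c] = last
--         return out
--
--     filled = [hfill(grid[r]) for r in range(R)]
--     cur = next((v for v in filled if v is not None), None)
--     if cur is None:
--         return grid
--     for r in range(R):
--         if filled[r] is not None:
--             cur = filled[r]
--         grid[r] = cur
--     return grid
-- ===== Notes on version B (the rewrite author's own statement) =====
-- stated objective: alternative
-- what changed: A's single interleaved scan with a 4-branch (empty,seen) state machine, in-place cell writes and an emptyRows counter is replaced by two separate phases: a per-row functional fill that returns None for all-'?' rows, then one vertical sweep that carries the nearest filled row downward; Pre_ additionally excludes row > len(grid) with col <= 0, where A returns the grid untouched only because its empty inner loop never indexes a row, while B's per-row pass raises IndexError.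
-- outside the precondition, e.g. on cakeSplit([], 9, -1): A returns [], B raises IndexError
import Mathlib
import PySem

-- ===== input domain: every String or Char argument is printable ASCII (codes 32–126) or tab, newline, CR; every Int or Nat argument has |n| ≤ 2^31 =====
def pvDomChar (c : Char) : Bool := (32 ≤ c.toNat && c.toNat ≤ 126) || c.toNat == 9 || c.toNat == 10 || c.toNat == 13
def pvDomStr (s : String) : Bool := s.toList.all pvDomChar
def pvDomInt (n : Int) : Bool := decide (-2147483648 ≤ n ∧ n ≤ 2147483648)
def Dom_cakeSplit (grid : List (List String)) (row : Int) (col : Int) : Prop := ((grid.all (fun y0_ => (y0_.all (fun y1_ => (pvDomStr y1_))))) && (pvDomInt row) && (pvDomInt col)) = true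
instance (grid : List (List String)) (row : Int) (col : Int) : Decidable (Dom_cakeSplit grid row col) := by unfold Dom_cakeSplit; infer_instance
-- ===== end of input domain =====

-- B rewrites A as a per-row fill returning Option plus a vertical carry sweep (alternative decomposition).
-- Both Pythons mutate `grid` in place (A also aliases row objects); the equivalence proved here is about the return value.

-- ===== PORT A =====
-- inner 'for i in range(empty): grid[r][i] = seen'
def pvFillLeadA (e : Nat) (v : String) (l : List String) : List String :=
  (List.range e).foldl (fun acc i => acc.set i v) l

-- one iteration of A's inner 'for c in range(col)' loop; state = (row, empty, seen)
def pvInnerA (st : List String × Nat × String) (c : Nat) : List String × Nat × String :=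
  let v := st.1.getD c ""
  if v = "?" ∧ st.2.2 = "?" then (st.1, st.2.1 + 1, st.2.2)
  else if v ≠ "?" ∧ st.2.1 > 0 then (pvFillLeadA st.2.1 v st.1, 0, v)
  else if v ≠ "?" ∧ st.2.1 = 0 then (st.1, st.2.1, v)
  else if v = "?" ∧ st.2.2 ≠ "?" then (st.1.set c st.2.2, st.2.1, st.2.2)
  else st

-- one iteration of A's outer 'for r in range(row)' loop; state = (grid, emptyRows, filled)
def pvOuterA (col : Int) (st : List (List String) × Nat × Bool) (r : Nat) :
    List (List String) × Nat × Bool :=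
  let res := (List.range col.toNat).foldl pvInnerA (st.1.getD r [], 0, "?")
  let g1 := st.1.set r res.1
  if res.2.2 = "?" ∧ st.2.2 = false then (g1, st.2.1 + 1, st.2.2)
  else if res.2.2 = "?" ∧ st.2.2 = true then (g1.set r (g1.getD (r - 1) []), st.2.1, st.2.2)
  else if res.2.2 ≠ "?" ∧ st.2.2 = false then
    ((List.range st.2.1).foldl (fun acc i => acc.set i (acc.getD r [])) g1, st.2.1, true)
  else (g1, st.2.1, st.2.2)

def cakeSplit (grid : List (List String)) (row : Int) (col : Int) : List (List String) :=
  ((List.range row.toNat).foldl (pvOuterA col) (grid, 0, false)).1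

-- ===== PORT B =====
-- one iteration of hfill's 'for c in range(C)' loop; state = (out, last); reads the fixed `cells`
def pvHFillStep (cells : List String) (p : List String × String) (c : Nat) : List String × String :=
  let last := if cells.getD c "" ≠ "?" then cells.getD c "" else p.2
  (p.1.set c last, last)

-- Source B's hfill: None for an all-'?' row, else the horizontally filled copy
def pvHFill (C : Nat) (cells : List String) : Option (List String) :=
  match (List.range C).find? (fun c => cells.getD c "" != "?") with
  | none => none
  | some first =>
      some (((List.range C).foldl (pvHFillStep cells) (cells, cells.getD first "")).1)

-- one iteration of Source B's vertical sweep; state = (grid, cur)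
def pvVStep (filled : List (Option (List String))) (st : List (List String) × List String)
    (r : Nat) : List (List String) × List String :=
  let cur := match filled.getD r none with
    | some v => v
    | none => st.2
  (st.1.set r cur, cur)

def cakeSplit_alt (grid : List (List String)) (row : Int) (col : Int) : List (List String) :=
  let filled := (List.range row.toNat).map (fun r => pvHFill col.toNat (grid.getD r []))
  match filled.findSome? id with
  | none => grid
  | some cur0 => ((List.range row.toNat).foldl (pvVStep filled) (grid, cur0)).1

-- ===== PRECONDITION & SPEC =====
-- Pre excludes the inputs on which Python A raises IndexError (a processed row index beyond the
-- grid, or a processed column index beyond that row); it also excludes row > len(grid) with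
-- col <= 0, where A returns the grid untouched only because its empty inner loop never indexes
-- a row, while B's natural per-row pass raises IndexError there.
def Pre_cakeSplit (grid : List (List String)) (row : Int) (col : Int) : Prop :=
  row.toNat ≤ grid.length ∧ ∀ l ∈ grid.take row.toNat, col.toNat ≤ l.length

instance (grid : List (List String)) (row : Int) (col : Int) : Decidable (Pre_cakeSplit grid row col) := by
  unfold Pre_cakeSplit; infer_instance

def pvWitness_cakeSplit : List (List String) × Int × Int := ([["?", "a"], ["?", "?"]], 2, 2)

def Spec_cakeSplit (grid : List (List String)) (row : Int) (col : Int) (out : List (List String)) : Prop := out = cakeSplit_alt grid row col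
instance (grid : List (List String)) (row : Int) (col : Int) (out : List (List String)) : Decidable (Spec_cakeSplit grid row col out) := by unfold Spec_cakeSplit; infer_instance

-- ===== CLAIM (what is proved, stated in full; the proofs are below) =====
def Claim_equal_cakeSplit : Prop := ∀ (grid : List (List String)) (row : Int) (col : Int), Dom_cakeSplit grid row col → Pre_cakeSplit grid row col → Spec_cakeSplit grid row col (cakeSplit grid row col)

-- ===== LEMMAS AND PROOFS =====

-- repeated set of the same value at a list of indices
def pvSets {α : Type} (is : List Nat) (v : α) (l : List α) : List α :=
  is.foldl (fun acc i => acc.set i v) l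

theorem pv_getD_set_ne {α : Type} (l : List α) (i j : Nat) (v d : α) (h : i ≠ j) :
    (l.set i v).getD j d = l.getD j d := by
  simp [List.getD_eq_getElem?_getD, List.getElem?_set_ne h]

theorem pv_getD_set_self {α : Type} (l : List α) (i : Nat) (v d : α) (h : i < l.length) :
    (l.set i v).getD i d = v := by
  simp [List.getD_eq_getElem?_getD, List.getElem?_set_self h]

theorem pv_set_getD_self {α : Type} (l : List α) (i : Nat) (d : α) :
    l.set i (l.getD i d) = l := by
  induction l generalizing i with
  | nil => simp
  | cons a t ih =>
      cases i with
      | zero => simp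
      | succ n => simp only [List.set_cons_succ, List.getD_cons_succ]; rw [ih]

theorem pv_set_eq_self {α : Type} (l : List α) (i : Nat) (v d : α) (h : l.getD i d = v) :
    l.set i v = l := by rw [← h]; exact pv_set_getD_self l i d

theorem pvSets_cons {α : Type} (a : Nat) (t : List Nat) (v : α) (l : List α) :
    pvSets (a :: t) v l = pvSets t v (l.set a v) := rfl

theorem pvSets_length {α : Type} (is : List Nat) (v : α) (l : List α) :
    (pvSets is v l).length = l.length := by
  induction is generalizing l with
  | nil => rfl
  | cons a t ih => rw [pvSets_cons, ih, List.length_set]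

theorem pvSets_getD_ne {α : Type} (is : List Nat) (v d : α) (l : List α) (j : Nat)
    (h : ∀ i ∈ is, i ≠ j) : (pvSets is v l).getD j d = l.getD j d := by
  induction is generalizing l with
  | nil => rfl
  | cons a t ih =>
      rw [pvSets_cons, ih _ (fun i hi => h i (List.mem_cons_of_mem _ hi)),
        pv_getD_set_ne _ _ _ _ _ (h a (List.mem_cons_self ..))]

theorem pvSets_set_comm {α : Type} (is : List Nat) (v w : α) (l : List α) (j : Nat)
    (h : ∀ i ∈ is, i ≠ j) : (pvSets is v l).set j w = pvSets is v (l.set j w) := by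
  induction is generalizing l with
  | nil => rfl
  | cons a t ih =>
      rw [pvSets_cons, pvSets_cons, ih _ (fun i hi => h i (List.mem_cons_of_mem _ hi)),
        List.set_comm _ _ (h a (List.mem_cons_self ..))]

theorem pv_range_split (C f : Nat) (h : f < C) :
    List.range C = List.range' 0 f ++ f :: List.range' (f + 1) (C - f - 1) := by
  have h2 : List.range' f (C - f) = f :: List.range' (f + 1) (C - f - 1) := by
    have h4 := @List.range'_succ f (C - f - 1) 1
    rw [show C - f - 1 + 1 = C - f by omega] at h4
    simpa using h4
  have h3 := @List.range'_append 0 f (C - f) 1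
  simp only [Nat.one_mul, Nat.zero_add] at h3
  rw [List.range_eq_range', ← h2, h3, show f + (C - f) = C by omega]

theorem pv_find?_range'_some (p : Nat → Bool) :
    ∀ (b a f : Nat), (List.range' a b).find? p = some f →
      a ≤ f ∧ f < a + b ∧ p f = true ∧ ∀ j, a ≤ j → j < f → p j = false := by
  intro b
  induction b with
  | zero => intro a f h; simp at h
  | succ n ih =>
      intro a f h
      rw [List.range'_succ, List.find?_cons] at h
      cases hpa : p a with
      | true =>
          rw [hpa] at h
          simp only at h
          injection h with h
          subst h
          exact ⟨le_refl _, by omega, hpa, fun j h1 h2 => absurd (lt_of_le_of_lt h1 h2) (lt_irrefl _)⟩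
      | false =>
          rw [hpa] at h
          simp only at h
          obtain ⟨h1, h2, h3, h4⟩ := ih (a + 1) f h
          refine ⟨by omega, by omega, h3, fun j hj1 hj2 => ?_⟩
          rcases Nat.eq_or_lt_of_le hj1 with he | hl
          · rw [← he]; exact hpa
          · exact h4 j hl hj2

theorem pv_findSome?_range'_some {β : Type} (h : Nat → Option β) :
    ∀ (b a : Nat) (v : β), (List.range' a b).findSome? h = some v →
      ∃ f, a ≤ f ∧ f < a + b ∧ h f = some v ∧ ∀ j, a ≤ j → j < f → h j = none := by
  intro b
  induction b with
  | zero => intro a v hv; simp at hv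
  | succ n ih =>
      intro a v hv
      rw [List.range'_succ, List.findSome?_cons] at hv
      cases hha : h a with
      | some w =>
          rw [hha] at hv
          simp only at hv
          injection hv with hv
          subst hv
          exact ⟨a, le_refl _, by omega, hha,
            fun j h1 h2 => absurd (lt_of_le_of_lt h1 h2) (lt_irrefl _)⟩
      | none =>
          rw [hha] at hv
          simp only at hv
          obtain ⟨f, h1, h2, h3, h4⟩ := ih (a + 1) v hv
          refine ⟨f, by omega, by omega, h3, fun j hj1 hj2 => ?_⟩
          rcases Nat.eq_or_lt_of_le hj1 with he | hl
          · rw [← he]; exact hha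
          · exact h4 j hl hj2

theorem pv_findSome?_range'_none {β : Type} (h : Nat → Option β) :
    ∀ (b a : Nat), (List.range' a b).findSome? h = none →
      ∀ j, a ≤ j → j < a + b → h j = none := by
  intro b
  induction b with
  | zero => intro a _ j h1 h2; omega
  | succ n ih =>
      intro a hv j h1 h2
      rw [List.range'_succ, List.findSome?_cons] at hv
      cases hha : h a with
      | some w => rw [hha] at hv; simp at hv
      | none =>
          rw [hha] at hv
          simp only at hv
          rcases Nat.eq_or_lt_of_le h1 with he | hl
          · rw [← he]; exact hha
          · exact ih (a + 1) hv j hl (by omega)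

theorem pv_filled_getD {β : Type} (hf : Nat → Option β) (n r : Nat) :
    ((List.range n).map hf).getD r none = if r < n then hf r else none := by
  rw [List.getD_eq_getElem?_getD, List.getElem?_map]
  by_cases h : r < n
  · rw [List.getElem?_range h]; simp [h]
  · have hn : (List.range n)[r]? = none := by
      rw [List.getElem?_eq_none]; simpa using Nat.le_of_not_lt h
    rw [hn]; simp [h]

-- A's inner loop on a stretch of all-'?' cells: only counts
theorem pvInnerA_allq (cells : List String) :
    ∀ (b a e : Nat), (∀ c, a ≤ c → c < a + b → cells.getD c "" = "?") →
      (List.range' a b).foldl pvInnerA (cells, e, "?") = (cells, e + b, "?") := by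
  intro b
  induction b with
  | zero => intro a e _; simp
  | succ n ih =>
      intro a e hq
      rw [List.range'_succ, List.foldl_cons]
      have hv : cells.getD a "" = "?" := hq a (le_refl _) (by omega)
      have hstep : pvInnerA (cells, e, "?") a = (cells, e + 1, "?") := by
        rw [List.getD_eq_getElem?_getD] at hv
        simp [pvInnerA, hv]
      rw [hstep, show e + (n + 1) = (e + 1) + n by omega]
      exact ih (a + 1) (e + 1) (fun c h1 h2 => hq c (by omega) (by omega))

-- A's inner loop once `seen` is set equals Source B's carry fold
theorem pvInnerA_mode2 (cells : List String) :
    ∀ (b a : Nat) (l : List String) (s : String), s ≠ "?" →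
      (∀ c, a ≤ c → c < a + b → l.getD c "" = cells.getD c "") →
      (List.range' a b).foldl pvInnerA (l, 0, s) =
        (((List.range' a b).foldl (pvHFillStep cells) (l, s)).1, 0,
          ((List.range' a b).foldl (pvHFillStep cells) (l, s)).2) ∧
      ((List.range' a b).foldl (pvHFillStep cells) (l, s)).2 ≠ "?" := by
  intro b
  induction b with
  | zero => intro a l s hs _; exact ⟨rfl, hs⟩
  | succ n ih =>
      intro a l s hs hagree
      rw [List.range'_succ, List.foldl_cons, List.foldl_cons]
      have hla : l.getD a "" = cells.getD a "" := hagree a (le_refl _) (by omega)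
      by_cases hv : cells.getD a "" = "?"
      · have hla' : l[a]?.getD "" = "?" := by rw [← List.getD_eq_getElem?_getD, hla]; exact hv
        have hv' : cells[a]?.getD "" = "?" := by rw [← List.getD_eq_getElem?_getD]; exact hv
        have hstepA : pvInnerA (l, 0, s) a = (l.set a s, 0, s) := by
          simp [pvInnerA, hla', hs]
        have hstepB : pvHFillStep cells (l, s) a = (l.set a s, s) := by
          simp [pvHFillStep, hv']
        rw [hstepA, hstepB]
        exact ih (a + 1) (l.set a s) s hs (fun c h1 h2 => by
          rw [pv_getD_set_ne _ _ _ _ _ (by omega)]; exact hagree c (by omega) (by omega))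
      · have hlv : l[a]?.getD "" = cells[a]?.getD "" := by
          rw [← List.getD_eq_getElem?_getD, ← List.getD_eq_getElem?_getD]; exact hla
        have hv' : ¬ cells[a]?.getD "" = "?" := by rw [← List.getD_eq_getElem?_getD]; exact hv
        have hstepA : pvInnerA (l, 0, s) a = (l, 0, cells.getD a "") := by
          simp [pvInnerA, hlv, hv', List.getD_eq_getElem?_getD]
        have hstepB : pvHFillStep cells (l, s) a = (l, cells.getD a "") := by
          simp only [pvHFillStep, if_pos hv]
          rw [pv_set_eq_self _ _ _ _ hla]
        rw [hstepA, hstepB]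
        exact ih (a + 1) l _ hv (fun c h1 h2 => hagree c (by omega) (by omega))

-- Source B's carry fold on a stretch of all-'?' cells just spreads `last`
theorem pvHFillStep_allq (cells : List String) :
    ∀ (b a : Nat) (l : List String) (s : String),
      (∀ c, a ≤ c → c < a + b → cells.getD c "" = "?") →
      (List.range' a b).foldl (pvHFillStep cells) (l, s) = (pvSets (List.range' a b) s l, s) := by
  intro b
  induction b with
  | zero => intro a l s _; rfl
  | succ n ih =>
      intro a l s hq
      rw [List.range'_succ, List.foldl_cons, pvSets_cons]
      have hv : cells.getD a "" = "?" := hq a (le_refl _) (by omega)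
      have hstep : pvHFillStep cells (l, s) a = (l.set a s, s) := by
        have hv' : cells[a]?.getD "" = "?" := by rw [← List.getD_eq_getElem?_getD]; exact hv
        simp [pvHFillStep, hv']
      rw [hstep]
      exact ih (a + 1) (l.set a s) s (fun c h1 h2 => hq c (by omega) (by omega))

theorem pvFillLeadA_eq_pvSets (e : Nat) (v : String) (l : List String) :
    pvFillLeadA e v l = pvSets (List.range' 0 e) v l := by
  simp [pvFillLeadA, pvSets, List.range_eq_range']

theorem pvInnerA_of_hfill_none (C : Nat) (cells : List String) (h : pvHFill C cells = none) :
    (List.range C).foldl pvInnerA (cells, 0, "?") = (cells, C, "?") := by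
  have hfind : (List.range C).find? (fun c => cells.getD c "" != "?") = none := by
    unfold pvHFill at h
    cases hfind : (List.range C).find? (fun c => cells.getD c "" != "?") with
    | none => rfl
    | some f => rw [hfind] at h; simp at h
  have hall : ∀ c, 0 ≤ c → c < 0 + C → cells.getD c "" = "?" := by
    intro c _ hc
    have hm := List.find?_eq_none.mp hfind c (List.mem_range.mpr (by omega))
    simpa [bne_iff_ne] using hm
  rw [List.range_eq_range']
  simpa using pvInnerA_allq cells C 0 0 hall

theorem pvInnerA_of_hfill_some (C : Nat) (cells : List String) (w : List String)
    (h : pvHFill C cells = some w) :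
    ∃ s', s' ≠ "?" ∧ (List.range C).foldl pvInnerA (cells, 0, "?") = (w, 0, s') := by
  unfold pvHFill at h
  cases hfind : (List.range C).find? (fun c => cells.getD c "" != "?") with
  | none => rw [hfind] at h; simp at h
  | some f =>
      rw [hfind] at h
      simp only [Option.some.injEq] at h
      have hfind' := hfind
      rw [List.range_eq_range'] at hfind'
      obtain ⟨-, hfC, hpf, hmin⟩ := pv_find?_range'_some _ C 0 f hfind'
      rw [Nat.zero_add] at hfC
      have hvf : cells.getD f "" ≠ "?" := by simpa [bne_iff_ne] using hpf
      have hallq : ∀ c, 0 ≤ c → c < 0 + f → cells.getD c "" = "?" := by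
        intro c _ hc
        have hm := hmin c (Nat.zero_le _) (by omega)
        simpa [bne_iff_ne] using hm
      have hsplit := pv_range_split C f hfC
      rw [hsplit, List.foldl_append, List.foldl_cons] at h ⊢
      rw [pvHFillStep_allq cells f 0 cells (cells.getD f "") hallq] at h
      rw [pvInnerA_allq cells f 0 0 hallq]
      have hL1f : (pvSets (List.range' 0 f) (cells.getD f "") cells).getD f "" = cells.getD f "" := by
        rw [pvSets_getD_ne]
        intro i hi; have := (List.mem_range'_1.mp hi).2; omega
      have hstepB : pvHFillStep cells (pvSets (List.range' 0 f) (cells.getD f "") cells, cells.getD f "") f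
          = (pvSets (List.range' 0 f) (cells.getD f "") cells, cells.getD f "") := by
        simp only [pvHFillStep, if_pos hvf]
        rw [pv_set_eq_self _ _ _ _ hL1f]
      have hstepA : pvInnerA (cells, 0 + f, "?") f
          = (pvSets (List.range' 0 f) (cells.getD f "") cells, 0, cells.getD f "") := by
        have hvf' : ¬ cells[f]?.getD "" = "?" := by rw [← List.getD_eq_getElem?_getD]; exact hvf
        rcases Nat.eq_zero_or_pos f with hf0 | hfpos
        · subst hf0
          simp [pvInnerA, hvf', pvSets, List.getD_eq_getElem?_getD]
        · have : pvInnerA (cells, 0 + f, "?") f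
              = (pvFillLeadA (0 + f) (cells.getD f "") cells, 0, cells.getD f "") := by
            simp [pvInnerA, hvf', hfpos, List.getD_eq_getElem?_getD]
          rw [this, pvFillLeadA_eq_pvSets]
          simp
      rw [hstepB] at h
      rw [hstepA]
      have hagree : ∀ c, f + 1 ≤ c → c < f + 1 + (C - f - 1) →
          (pvSets (List.range' 0 f) (cells.getD f "") cells).getD c "" = cells.getD c "" := by
        intro c h1 _
        rw [pvSets_getD_ne]
        intro i hi; have := (List.mem_range'_1.mp hi).2; omega
      obtain ⟨heq, hne⟩ := pvInnerA_mode2 cells (C - f - 1) (f + 1)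
        (pvSets (List.range' 0 f) (cells.getD f "") cells) (cells.getD f "") hvf hagree
      exact ⟨_, hne, by rw [heq, h]⟩

-- A's 'for i in range(emptyRows): grid[i] = grid[r]' loop, when the read slot is untouched
theorem pv_fill_loop {α : Type} :
    ∀ (is : List Nat) (j : Nat) (g : List α) (d v : α), (∀ i ∈ is, i ≠ j) → g.getD j d = v →
      is.foldl (fun acc i => acc.set i (acc.getD j d)) g = pvSets is v g := by
  intro is
  induction is with
  | nil => intro j g d v _ _; rfl
  | cons a t ih =>
      intro j g d v hne hj
      rw [List.foldl_cons, pvSets_cons, hj]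
      exact ih j (g.set a v) d v (fun i hi => hne i (List.mem_cons_of_mem _ hi))
        (by rw [pv_getD_set_ne _ _ _ _ _ (hne a (List.mem_cons_self ..))]; exact hj)

-- A's outer loop over a stretch of all-'?' rows only counts
theorem pvOuterA_allnone (grid : List (List String)) (col : Int) :
    ∀ (b a er : Nat),
      (∀ r, a ≤ r → r < a + b → pvHFill col.toNat (grid.getD r []) = none) →
      (List.range' a b).foldl (pvOuterA col) (grid, er, false) = (grid, er + b, false) := by
  intro b
  induction b with
  | zero => intro a er _; simp
  | succ n ih =>
      intro a er hall
      rw [List.range'_succ, List.foldl_cons]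
      have hinner := pvInnerA_of_hfill_none col.toNat (grid.getD a []) (hall a (le_refl _) (by omega))
      have hstep : pvOuterA col (grid, er, false) a = (grid, er + 1, false) := by
        simp only [pvOuterA, hinner]
        rw [pv_set_getD_self]
        simp
      rw [hstep, show er + (n + 1) = (er + 1) + n by omega]
      exact ih (a + 1) (er + 1) (fun r h1 h2 => hall r (by omega) (by omega))

-- Source B's vertical sweep over a stretch of empty rows spreads `cur`
theorem pvVStep_nones (filled : List (Option (List String))) :
    ∀ (b a : Nat) (g : List (List String)) (cur : List String),
      (∀ r, a ≤ r → r < a + b → filled.getD r none = none) →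
      (List.range' a b).foldl (pvVStep filled) (g, cur) = (pvSets (List.range' a b) cur g, cur) := by
  intro b
  induction b with
  | zero => intro a g cur _; rfl
  | succ n ih =>
      intro a g cur hall
      rw [List.range'_succ, List.foldl_cons, pvSets_cons]
      have hstep : pvVStep filled (g, cur) a = (g.set a cur, cur) := by
        have h0 : filled[a]?.getD none = none := by
          rw [← List.getD_eq_getElem?_getD]; exact hall a (le_refl _) (by omega)
        simp [pvVStep, h0]
      rw [hstep]
      exact ih (a + 1) (g.set a cur) cur (fun r h1 h2 => hall r (by omega) (by omega))

-- after the first filled row both loops advance in lockstep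
theorem pv_phase3 (grid : List (List String)) (col : Int) (R : Nat) (hR : R ≤ grid.length) :
    ∀ (b a : Nat) (g : List (List String)) (cur : List String) (er : Nat),
      a + b ≤ R → 1 ≤ a → g.length = grid.length →
      (∀ r, a ≤ r → r < R → g.getD r [] = grid.getD r []) →
      g.getD (a - 1) [] = cur →
      ((List.range' a b).foldl (pvOuterA col) (g, er, true)).1 =
        ((List.range' a b).foldl
          (pvVStep ((List.range R).map (fun r => pvHFill col.toNat (grid.getD r [])))) (g, cur)).1 := by
  intro b
  induction b with
  | zero => intro a g cur er _ _ _ _ _; rfl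
  | succ n ih =>
      intro a g cur er hab ha hlen hagree hcur
      rw [List.range'_succ, List.foldl_cons, List.foldl_cons]
      have haR : a < R := by omega
      have hag : a < g.length := by rw [hlen]; omega
      have hga : g.getD a [] = grid.getD a [] := hagree a (le_refl _) haR
      have hfget : ((List.range R).map (fun r => pvHFill col.toNat (grid.getD r []))).getD a none
          = pvHFill col.toNat (grid.getD a []) := by
        rw [pv_filled_getD]; simp [haR]
      cases hha : pvHFill col.toNat (grid.getD a []) with
      | some w =>
          obtain ⟨s', hs', hinner⟩ := pvInnerA_of_hfill_some col.toNat (grid.getD a []) w hha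
          have hstepA : pvOuterA col (g, er, true) a = (g.set a w, er, true) := by
            simp only [pvOuterA, hga, hinner]
            simp [hs']
          have hstepB : pvVStep ((List.range R).map (fun r => pvHFill col.toNat (grid.getD r [])))
              (g, cur) a = (g.set a w, w) := by
            have h0 := hfget.trans hha
            simp only [pvVStep, h0]
          rw [hstepA, hstepB]
          exact ih (a + 1) (g.set a w) w er (by omega) (by omega)
            (by rw [List.length_set]; exact hlen)
            (fun r h1 h2 => by
              rw [pv_getD_set_ne _ _ _ _ _ (by omega)]; exact hagree r (by omega) h2)
            (by simpa using pv_getD_set_self g a w [] hag)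
      | none =>
          have hinner := pvInnerA_of_hfill_none col.toNat (grid.getD a []) hha
          have hstepA : pvOuterA col (g, er, true) a = (g.set a cur, er, true) := by
            simp only [pvOuterA, hga, hinner]
            rw [← hga, pv_set_getD_self]
            have hcur' : g[a - 1]?.getD [] = cur := by
              rw [← List.getD_eq_getElem?_getD]; exact hcur
            simp [hcur']
          have hstepB : pvVStep ((List.range R).map (fun r => pvHFill col.toNat (grid.getD r [])))
              (g, cur) a = (g.set a cur, cur) := by
            have h0 := hfget.trans hha
            simp only [pvVStep, h0]
          rw [hstepA, hstepB]
          exact ih (a + 1) (g.set a cur) cur er (by omega) (by omega)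
            (by rw [List.length_set]; exact hlen)
            (fun r h1 h2 => by
              rw [pv_getD_set_ne _ _ _ _ _ (by omega)]; exact hagree r (by omega) h2)
            (by simpa using pv_getD_set_self g a cur [] hag)

-- ===== VERDICT (by name: the statement is the Claim_ definition above) =====
theorem cakeSplit_spec : Claim_equal_cakeSplit := by
  intro grid row col _ hpre
  obtain ⟨hRlen, _⟩ := hpre
  unfold Spec_cakeSplit cakeSplit cakeSplit_alt
  simp only [List.findSome?_map, Function.id_comp]
  cases hfs : (List.range row.toNat).findSome?
      (fun r => pvHFill col.toNat (grid.getD r [])) with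
  | none =>
      have hfs' := hfs
      rw [List.range_eq_range'] at hfs'
      have hall := pv_findSome?_range'_none _ row.toNat 0 hfs'
      rw [List.range_eq_range',
        pvOuterA_allnone grid col row.toNat 0 0 (fun r h1 h2 => hall r h1 h2)]
  | some cur0 =>
      have hfs' := hfs
      rw [List.range_eq_range'] at hfs'
      obtain ⟨f, -, hfR, hf, hmin⟩ := pv_findSome?_range'_some _ row.toNat 0 cur0 hfs'
      rw [Nat.zero_add] at hfR
      have hflen : f < grid.length := by omega
      set F := (List.range row.toNat).map (fun r => pvHFill col.toNat (grid.getD r [])) with hF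
      rw [pv_range_split row.toNat f hfR, List.foldl_append, List.foldl_cons]
      have hmatch : (match some cur0 with
          | none => grid
          | some c => (List.foldl (pvVStep F) (grid, c)
              (List.range' 0 f ++ f :: List.range' (f + 1) (row.toNat - f - 1))).1)
          = (List.foldl (pvVStep F) (grid, cur0)
              (List.range' 0 f ++ f :: List.range' (f + 1) (row.toNat - f - 1))).1 := rfl
      rw [hmatch, List.foldl_append, List.foldl_cons]
      -- A phase 1
      rw [pvOuterA_allnone grid col f 0 0 (fun r h1 h2 => hmin r h1 (by omega))]
      -- A step at the first filled row
      obtain ⟨s', hs', hinner⟩ := pvInnerA_of_hfill_some col.toNat (grid.getD f []) cur0 hf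
      have hstepA : pvOuterA col (grid, 0 + f, false) f
          = (pvSets (List.range' 0 f) cur0 (grid.set f cur0), 0 + f, true) := by
        simp only [pvOuterA, hinner]
        simp only [hs', Nat.zero_add]
        rw [pv_fill_loop (List.range f) f (grid.set f cur0) [] cur0
          (fun i hi => by have := List.mem_range.mp hi; omega)
          (pv_getD_set_self _ _ _ _ hflen)]
        rw [List.range_eq_range']
        simp [hs']
      rw [hstepA]
      -- B phase 1
      have hFget : ∀ r, r < row.toNat →
          F.getD r none = pvHFill col.toNat (grid.getD r []) := by
        intro r hr; rw [hF, pv_filled_getD]; simp [hr]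
      rw [pvVStep_nones _ f 0 grid cur0 (fun r h1 h2 => by
        rw [hFget r (by omega)]; exact hmin r h1 (by omega))]
      -- B step at the first filled row
      have hstepB : pvVStep F (pvSets (List.range' 0 f) cur0 grid, cur0) f
          = (pvSets (List.range' 0 f) cur0 (grid.set f cur0), cur0) := by
        have h0 : F.getD f none = some cur0 := by
          rw [hFget f hfR]; exact hf
        simp only [pvVStep, h0]
        rw [pvSets_set_comm _ _ _ _ _ (fun i hi => by
          have := (List.mem_range'_1.mp hi).2; omega)]
      rw [hstepB]
      -- lockstep tail
      have h3 := pv_phase3 grid col row.toNat hRlen (row.toNat - f - 1) (f + 1)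
        (pvSets (List.range' 0 f) cur0 (grid.set f cur0)) cur0 (0 + f)
        (by omega) (by omega)
        (by rw [pvSets_length, List.length_set])
        (fun r h1 h2 => by
          rw [pvSets_getD_ne _ _ _ _ _ (fun i hi => by
            have := (List.mem_range'_1.mp hi).2; omega)]
          exact pv_getD_set_ne _ _ _ _ _ (by omega))
        (by
          simp only [Nat.add_sub_cancel]
          rw [pvSets_getD_ne _ _ _ _ _ (fun i hi => by
            have := (List.mem_range'_1.mp hi).2; omega)]
          exact pv_getD_set_self _ _ _ _ hflen)
      rw [← hF] at h3
      exact h3
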